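-- pv_equiv track=rewrite | github.com/maxigas/metaturingmachine | Giulio_tm.py | reverter3
-- ===== SOURCE A (Python) =====
-- def reverter3(i,o=""):
--     '''Recursive reverter'''
--     if len(i) is 0:
--         return o
--     else:
--         if i[0] is "0":
--             o += "1"
--         elif i[0] is "1":
--             o += "0"
--         return reverter3(i[1:], o)
-- ===== SOURCE B (Python) =====
-- def reverter3(i, o=""):
--     '''Iterative reverter: one pass over the string with an accumulator.'''
--     for c in i:
--         if c == "0":
--             o += "1"
--         elif c == "1":
--             o += "0"
--     return o
-- ===== Notes on version B (the rewrite author's own statement) =====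
-- stated objective: simpler
-- what changed: Replaced the recursion on i[1:] (which copies the remaining string at every step) with a single iterative for-loop over the characters accumulating into o.
import Mathlib
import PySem

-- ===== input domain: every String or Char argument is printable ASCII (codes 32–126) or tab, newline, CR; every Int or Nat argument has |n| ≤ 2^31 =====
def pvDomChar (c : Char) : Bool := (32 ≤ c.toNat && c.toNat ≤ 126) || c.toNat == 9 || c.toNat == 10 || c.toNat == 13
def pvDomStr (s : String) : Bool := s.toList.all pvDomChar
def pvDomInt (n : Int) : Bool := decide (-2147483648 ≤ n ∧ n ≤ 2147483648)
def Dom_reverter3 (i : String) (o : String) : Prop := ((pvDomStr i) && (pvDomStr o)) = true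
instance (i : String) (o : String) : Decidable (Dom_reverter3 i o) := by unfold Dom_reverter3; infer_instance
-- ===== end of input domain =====

-- B replaces A's recursion on i[1:] with a single iterative pass over the characters (simpler decomposition).


-- ===== PORT A =====
-- A recurses: if i empty return o; else update o by the first char and recurse on i[1:].
def reverter3Rec : List Char → String → String
  | [], o => o
  | c :: rest, o =>
      reverter3Rec rest (if c = '0' then o ++ "1" else if c = '1' then o ++ "0" else o)

def reverter3 (i : String) (o : String) : String := reverter3Rec i.toList o

-- ===== PORT B =====
-- B: a for-loop over the characters of i accumulating into o (ported as a foldl).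
def reverter3_alt (i : String) (o : String) : String :=
  i.toList.foldl
    (fun o c => if c = '0' then o ++ "1" else if c = '1' then o ++ "0" else o) o

-- ===== PRECONDITION & SPEC =====
def Spec_reverter3 (i : String) (o : String) (out : String) : Prop := out = reverter3_alt i o
instance (i : String) (o : String) (out : String) : Decidable (Spec_reverter3 i o out) := by unfold Spec_reverter3; infer_instance

-- ===== CLAIM (what is proved, stated in full; the proofs are below) =====
def Claim_equal_reverter3 : Prop := ∀ (i : String) (o : String), Dom_reverter3 i o → Spec_reverter3 i o (reverter3 i o)

-- ===== LEMMAS AND PROOFS =====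
theorem reverter3Rec_eq_foldl (l : List Char) (o : String) :
    reverter3Rec l o =
      l.foldl (fun o c => if c = '0' then o ++ "1" else if c = '1' then o ++ "0" else o) o := by
  induction l generalizing o with
  | nil => rfl
  | cons c rest ih => simp [reverter3Rec, List.foldl, ih]

-- ===== VERDICT (by name: the statement is the Claim_ definition above) =====
theorem reverter3_spec : Claim_equal_reverter3 := by
  intro i o _
  unfold Spec_reverter3 reverter3 reverter3_alt
  exact reverter3Rec_eq_foldl _ _
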